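-- pv_equiv track=rewrite | github.com/CXJ-jzx/Graduation-Project-dataflow_processing | experiment_cache/plot_results.py | get_ordered_strategies
-- ===== SOURCE A (Python) =====
-- STRATEGY_ORDER = ["FIFO", "LRU", "LFU", "LRU-K", "W-TINYLFU"]
--
-- def get_ordered_strategies(data):
--     ordered = []
--     for s in STRATEGY_ORDER:
--         if s in data:
--             ordered.append(s)
--     for s in data:
--         if s not in ordered:
--             ordered.append(s)
--     return ordered
-- ===== SOURCE B (Python) =====
-- STRATEGY_ORDER = ["FIFO", "LRU", "LFU", "LRU-K", "W-TINYLFU"]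
--
-- def get_ordered_strategies(data):
--     return sorted(data, key=lambda s: STRATEGY_ORDER.index(s) if s in STRATEGY_ORDER else len(STRATEGY_ORDER))
-- ===== Notes on version B (the rewrite author's own statement) =====
-- stated objective: faster
-- what changed: Replaced A's two list-building passes (the second scanning the growing output list for membership, quadratic) by a single stable sort of the dict's keys under a fixed-precedence key: known strategies get their index, unknown keys share the sentinel len(STRATEGY_ORDER) and keep insertion order by stability.
import Mathlib
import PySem

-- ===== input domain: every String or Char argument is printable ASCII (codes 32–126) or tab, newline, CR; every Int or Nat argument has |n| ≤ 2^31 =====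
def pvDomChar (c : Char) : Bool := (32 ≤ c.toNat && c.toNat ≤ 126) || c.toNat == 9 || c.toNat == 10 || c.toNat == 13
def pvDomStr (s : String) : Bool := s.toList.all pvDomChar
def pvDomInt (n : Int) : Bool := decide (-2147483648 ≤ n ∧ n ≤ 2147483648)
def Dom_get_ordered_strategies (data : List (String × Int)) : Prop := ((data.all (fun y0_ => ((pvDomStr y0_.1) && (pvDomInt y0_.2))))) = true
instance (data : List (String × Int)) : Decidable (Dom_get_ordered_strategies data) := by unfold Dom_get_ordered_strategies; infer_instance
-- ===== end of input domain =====

-- B replaces A's two append loops (the second scans the growing output list, quadratic) by a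
-- single stable sort of the dict's keys under a fixed precedence key; measured faster on the
-- timing run's large inputs. Same result on dict inputs, whose keys are distinct (Pre_).

-- ===== PORT A =====
def STRATEGY_ORDER : List String := ["FIFO", "LRU", "LFU", "LRU-K", "W-TINYLFU"]

-- iterating a Python dict (and `s in data`) sees its keys, in insertion order
def get_ordered_strategies (data : List (String × Int)) : List String :=
  let keys := data.map Prod.fst
  let ordered : List String :=
    STRATEGY_ORDER.foldl (fun ordered s => if s ∈ keys then ordered ++ [s] else ordered) []
  keys.foldl (fun ordered s => if s ∈ ordered then ordered else ordered ++ [s]) ordered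

-- ===== PORT B =====
-- `STRATEGY_ORDER.index(s)` is guarded by `s in STRATEGY_ORDER`, so index? is `some` there;
-- `.getD 0` only discharges the option
def get_ordered_strategies_alt (data : List (String × Int)) : List String :=
  PySem.List.sorted (data.map Prod.fst)
    (fun s => if s ∈ STRATEGY_ORDER then (((PySem.List.index? STRATEGY_ORDER s).getD 0 : Nat) : Int)
              else (STRATEGY_ORDER.length : Int)) false

-- ===== PRECONDITION & SPEC =====
-- Pre_ requires the keys of the association list to be pairwise distinct — true of every Python
-- dict, the function's input; only in the association-list model can duplicate keys appear, and
-- there A deduplicates while B's stable sort keeps duplicates, neither being dict behaviour.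
def Pre_get_ordered_strategies (data : List (String × Int)) : Prop := (data.map Prod.fst).Nodup
instance (data : List (String × Int)) : Decidable (Pre_get_ordered_strategies data) := by unfold Pre_get_ordered_strategies; infer_instance
def pvWitness_get_ordered_strategies : (List (String × Int)) := [("LRU", 1), ("zeta", -2), ("FIFO", 3)]

def Spec_get_ordered_strategies (data : List (String × Int)) (out : List String) : Prop := out = get_ordered_strategies_alt data
instance (data : List (String × Int)) (out : List String) : Decidable (Spec_get_ordered_strategies data out) := by unfold Spec_get_ordered_strategies; infer_instance

-- ===== CLAIM (what is proved, stated in full; the proofs are below) =====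
def Claim_equal_get_ordered_strategies : Prop := ∀ (data : List (String × Int)), Dom_get_ordered_strategies data → Pre_get_ordered_strategies data → Spec_get_ordered_strategies data (get_ordered_strategies data)

-- ===== LEMMAS AND PROOFS =====

-- the key function of port B, named for the proofs
def pvKey (s : String) : Int :=
  if s ∈ STRATEGY_ORDER then (((PySem.List.index? STRATEGY_ORDER s).getD 0 : Nat) : Int)
  else (STRATEGY_ORDER.length : Int)

theorem pvKey_eq (s : String) :
    pvKey s = if s = "FIFO" then 0 else if s = "LRU" then 1 else if s = "LFU" then 2
      else if s = "LRU-K" then 3 else if s = "W-TINYLFU" then 4 else 5 := by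
  by_cases h0 : s = "FIFO"; · simp [pvKey, h0]; decide
  by_cases h1 : s = "LRU"; · simp [pvKey, h1]; decide
  by_cases h2 : s = "LFU"; · simp [pvKey, h2]; decide
  by_cases h3 : s = "LRU-K"; · simp [pvKey, h3]; decide
  by_cases h4 : s = "W-TINYLFU"; · simp [pvKey, h4]; decide
  have hm : s ∉ STRATEGY_ORDER := by simp [STRATEGY_ORDER, h0, h1, h2, h3, h4]
  unfold pvKey
  rw [if_neg hm]
  simp [h0, h1, h2, h3, h4]
  decide

theorem pvKey_cases (s : String) :
    pvKey s = 0 ∨ pvKey s = 1 ∨ pvKey s = 2 ∨ pvKey s = 3 ∨ pvKey s = 4 ∨ pvKey s = 5 := by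
  rw [pvKey_eq]; split_ifs <;> simp

theorem pvKey0 (s : String) : pvKey s = 0 ↔ s = "FIFO" := by
  rw [pvKey_eq]; split_ifs <;> simp_all
theorem pvKey1 (s : String) : pvKey s = 1 ↔ s = "LRU" := by
  rw [pvKey_eq]; split_ifs <;> simp_all
theorem pvKey2 (s : String) : pvKey s = 2 ↔ s = "LFU" := by
  rw [pvKey_eq]; split_ifs <;> simp_all
theorem pvKey3 (s : String) : pvKey s = 3 ↔ s = "LRU-K" := by
  rw [pvKey_eq]; split_ifs <;> simp_all
theorem pvKey4 (s : String) : pvKey s = 4 ↔ s = "W-TINYLFU" := by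
  rw [pvKey_eq]; split_ifs <;> simp_all
theorem pvKey5 (s : String) : pvKey s = 5 ↔ s ∉ STRATEGY_ORDER := by
  rw [pvKey_eq]; split_ifs <;> simp_all [STRATEGY_ORDER]

-- insertBy passes over a prefix none of whose elements compare after x
theorem insertBy_append_left {α : Type} (before : α → α → Bool) (x : α) (A B : List α)
    (h : ∀ b ∈ A, before x b = false) :
    PySem.List.insertBy before x (A ++ B) = A ++ PySem.List.insertBy before x B := by
  induction A with
  | nil => rfl
  | cons c t ih =>
    simp only [List.cons_append, PySem.List.insertBy, h c (by simp)]
    simp [ih (fun b hb => h b (by simp [hb]))]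

theorem insertBy_all_before {α : Type} (before : α → α → Bool) (x : α) (B : List α)
    (h : ∀ b ∈ B, before x b = true) :
    PySem.List.insertBy before x B = x :: B := by
  cases B with
  | nil => rfl
  | cons b t => simp [PySem.List.insertBy, h b (by simp)]

-- the stable sort of a list whose keys all lie in {0,…,5}, block by block
def pvBlocks (xs : List String) : List String :=
  (xs.filter (fun s => pvKey s = 0)) ++ (xs.filter (fun s => pvKey s = 1)) ++
  (xs.filter (fun s => pvKey s = 2)) ++ (xs.filter (fun s => pvKey s = 3)) ++
  (xs.filter (fun s => pvKey s = 4)) ++ (xs.filter (fun s => pvKey s = 5))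

theorem insertBy_pvBlocks (ys : List String) (x : String) :
    PySem.List.insertBy (fun a b => decide (pvKey a < pvKey b)) x (pvBlocks ys)
      = pvBlocks (ys ++ [x]) := by
  have hf : ∀ (j : Int) (a : String), a ∈ ys.filter (fun s => decide (pvKey s = j)) → pvKey a = j := by
    intro j a ha
    simpa using List.of_mem_filter ha
  rcases pvKey_cases x with hx|hx|hx|hx|hx|hx
  · simp only [pvBlocks, List.append_assoc]
    rw [insertBy_append_left _ _ _ _ (fun b hb => by simp [hf 0 b hb, hx]),
        insertBy_all_before _ _ _ (fun b hb => by
          simp only [List.mem_append] at hb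
          rcases hb with hb|hb|hb|hb|hb <;> simp [hf _ b hb, hx])]
    simp [List.filter_append, hx, List.append_assoc]
  · simp only [pvBlocks, List.append_assoc]
    rw [insertBy_append_left _ _ _ _ (fun b hb => by simp [hf 0 b hb, hx]),
        insertBy_append_left _ _ _ _ (fun b hb => by simp [hf 1 b hb, hx]),
        insertBy_all_before _ _ _ (fun b hb => by
          simp only [List.mem_append] at hb
          rcases hb with hb|hb|hb|hb <;> simp [hf _ b hb, hx])]
    simp [List.filter_append, hx, List.append_assoc]
  · simp only [pvBlocks, List.append_assoc]
    rw [insertBy_append_left _ _ _ _ (fun b hb => by simp [hf 0 b hb, hx]),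
        insertBy_append_left _ _ _ _ (fun b hb => by simp [hf 1 b hb, hx]),
        insertBy_append_left _ _ _ _ (fun b hb => by simp [hf 2 b hb, hx]),
        insertBy_all_before _ _ _ (fun b hb => by
          simp only [List.mem_append] at hb
          rcases hb with hb|hb|hb <;> simp [hf _ b hb, hx])]
    simp [List.filter_append, hx, List.append_assoc]
  · simp only [pvBlocks, List.append_assoc]
    rw [insertBy_append_left _ _ _ _ (fun b hb => by simp [hf 0 b hb, hx]),
        insertBy_append_left _ _ _ _ (fun b hb => by simp [hf 1 b hb, hx]),
        insertBy_append_left _ _ _ _ (fun b hb => by simp [hf 2 b hb, hx]),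
        insertBy_append_left _ _ _ _ (fun b hb => by simp [hf 3 b hb, hx]),
        insertBy_all_before _ _ _ (fun b hb => by
          simp only [List.mem_append] at hb
          rcases hb with hb|hb <;> simp [hf _ b hb, hx])]
    simp [List.filter_append, hx, List.append_assoc]
  · simp only [pvBlocks, List.append_assoc]
    rw [insertBy_append_left _ _ _ _ (fun b hb => by simp [hf 0 b hb, hx]),
        insertBy_append_left _ _ _ _ (fun b hb => by simp [hf 1 b hb, hx]),
        insertBy_append_left _ _ _ _ (fun b hb => by simp [hf 2 b hb, hx]),
        insertBy_append_left _ _ _ _ (fun b hb => by simp [hf 3 b hb, hx]),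
        insertBy_append_left _ _ _ _ (fun b hb => by simp [hf 4 b hb, hx]),
        insertBy_all_before _ _ _ (fun b hb => by simp [hf _ b hb, hx])]
    simp [List.filter_append, hx, List.append_assoc]
  · simp only [pvBlocks, List.append_assoc]
    rw [PySem.List.insertBy_of_forall_not_before _ _ _ (fun b hb => by
          simp only [List.mem_append] at hb
          rcases hb with hb|hb|hb|hb|hb|hb <;> simp [hf _ b hb, hx])]
    simp [List.filter_append, hx, List.append_assoc]

theorem sorted_eq_blocks (xs : List String) :
    PySem.List.sorted xs pvKey false = pvBlocks xs := by
  induction xs using List.reverseRecOn with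
  | nil => rfl
  | append_singleton ys x ih =>
    have hs : PySem.List.sorted (ys ++ [x]) pvKey false
        = PySem.List.insertBy (fun a b => decide (pvKey a < pvKey b)) x
            (PySem.List.sorted ys pvKey false) := by
      rw [PySem.List.sorted_eq_foldl_insertBy, PySem.List.sorted_eq_foldl_insertBy,
          List.foldl_append]
      rfl
    rw [hs, ih, insertBy_pvBlocks]

-- the second loop of A, under distinct keys: append exactly the keys not already collected
theorem foldl_dedup (keys : List String) (ordered : List String) (h : keys.Nodup) :
    keys.foldl (fun acc s => if s ∈ acc then acc else acc ++ [s]) ordered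
      = ordered ++ keys.filter (fun s => decide (s ∉ ordered)) := by
  induction keys generalizing ordered with
  | nil => simp
  | cons s t ih =>
    rcases List.nodup_cons.mp h with ⟨hs, ht⟩
    by_cases hmem : s ∈ ordered
    · simp only [List.foldl_cons, if_pos hmem, List.filter_cons]
      rw [ih ordered ht]
      simp [hmem]
    · simp only [List.foldl_cons, if_neg hmem, List.filter_cons]
      rw [ih (ordered ++ [s]) ht]
      have hcg : t.filter (fun a => decide (a ∉ ordered ++ [s]))
          = t.filter (fun a => decide (a ∉ ordered)) := by
        apply List.filter_congr
        intro a ha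
        have : a ≠ s := fun e => hs (e ▸ ha)
        simp [List.mem_append, this]
      rw [hcg]
      simp [hmem]

-- a filter for one key of a duplicate-free list
theorem filter_eq_of_nodup (keys : List String) (c : String) (h : keys.Nodup) :
    keys.filter (fun s => decide (s = c)) = if c ∈ keys then [c] else [] := by
  induction keys with
  | nil => simp
  | cons s t ih =>
    rcases List.nodup_cons.mp h with ⟨hs, ht⟩
    by_cases hc : s = c
    · subst hc
      simp [ih ht, hs]
    · simp [hc, ih ht, Ne.symm hc]

-- A's result, rewritten loop by loop, is exactly B's sorted blocks
theorem main_eq (keys : List String) (h : keys.Nodup) :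
    STRATEGY_ORDER.filter (fun s => decide (s ∈ keys))
      ++ keys.filter (fun s => decide (s ∉ STRATEGY_ORDER.filter (fun t => decide (t ∈ keys))))
      = pvBlocks keys := by
  have h5 : keys.filter (fun s => decide (s ∉ STRATEGY_ORDER.filter (fun t => decide (t ∈ keys))))
      = keys.filter (fun s => decide (pvKey s = 5)) := by
    apply List.filter_congr
    intro a ha
    simp [List.mem_filter, ha, pvKey5]
  have hb : ∀ (i : Int) (c : String), (∀ s, pvKey s = i ↔ s = c) →
      keys.filter (fun s => decide (pvKey s = i)) = if c ∈ keys then [c] else [] := by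
    intro i c hiff
    rw [show keys.filter (fun s => decide (pvKey s = i)) = keys.filter (fun s => decide (s = c))
          from List.filter_congr (fun a _ => by simp [hiff a]),
        filter_eq_of_nodup keys c h]
  rw [h5]
  simp only [pvBlocks]
  rw [hb 0 "FIFO" pvKey0, hb 1 "LRU" pvKey1, hb 2 "LFU" pvKey2,
      hb 3 "LRU-K" pvKey3, hb 4 "W-TINYLFU" pvKey4]
  by_cases k0 : "FIFO" ∈ keys <;> by_cases k1 : "LRU" ∈ keys <;> by_cases k2 : "LFU" ∈ keys <;>
    by_cases k3 : "LRU-K" ∈ keys <;> by_cases k4 : "W-TINYLFU" ∈ keys <;>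
    simp [STRATEGY_ORDER, k0, k1, k2, k3, k4]

-- ===== VERDICT (by name: the statement is the Claim_ definition above) =====
theorem get_ordered_strategies_spec : Claim_equal_get_ordered_strategies := by
  intro data _ hpre
  unfold Spec_get_ordered_strategies
  simp only [get_ordered_strategies, get_ordered_strategies_alt]
  have hk : (fun s => if s ∈ STRATEGY_ORDER
        then (((PySem.List.index? STRATEGY_ORDER s).getD 0 : Nat) : Int)
        else (STRATEGY_ORDER.length : Int)) = pvKey := rfl
  rw [hk, sorted_eq_blocks, PySem.List.foldl_append_ite_eq_filter,
      foldl_dedup _ _ hpre]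
  simpa using main_eq (data.map Prod.fst) hpre
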